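-- pv_equiv track=rewrite | github.com/DeadShotCS/Temp | WebDBTest/manager/data_manager.py | resolve_symbol_definition
-- ===== SOURCE A (Python) =====
-- SYMBOL_DATA = {
--     # --- NTOSKRNL 19041.1 ---
--     "ntoskrnl.exe (10.0.19041.1)": {
--         "functions": {
--             "PsGetCurrentProcess": {
--                 "type": "export",
--                 "code": "struct _EPROCESS* PsGetCurrentProcess(void) {\n    return (struct _EPROCESS*)KeGetCurrentThread()->ApcState.Process;\n}"
--             },
--             "KeQueryPerformanceCounter": {
--                 "type": "import",
--                 "source_binary": "hal.dll",
--                 "code": "// Redirected to hal.dll"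
--             },
--             "FltGetRoutineAddress": {
--                 "type": "import",
--                 "source_binary": "fltmgr.sys",
--                 "code": "// Redirected to fltmgr.sys"
--             }
--         },
--         "structs": {
--             "_EPROCESS": "struct _EPROCESS {\n    struct _KPROCESS Pcb;\n    uint32_t UniqueProcessId;\n};"
--         }
--     },
--     # --- NTOSKRNL 19041.500 ---
--     "ntoskrnl.exe (10.0.19041.500)": {
--         "functions": {
--             "PsGetCurrentProcess": {
--                 "type": "export",
--                 "code": "struct _EPROCESS* PsGetCurrentProcess(void) {\n    /* .500 Security Patch */\n    if (!PspIsContextValid()) return NULL;\n    return (struct _EPROCESS*)KeGetCurrentThread()->ApcState.Process;\n}"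
--             }
--         },
--         "structs": {}
--     },
--     # --- HAL.DLL Variations ---
--     "hal.dll (10.0.19041.1)": {
--         "functions": {
--             "KeQueryPerformanceCounter": {
--                 "type": "export",
--                 "code": "LARGE_INTEGER KeQueryPerformanceCounter(PLARGE_INTEGER PerformanceFrequency) {\n    return HalpGetPerformanceCounter();\n}"
--             }
--         },
--         "structs": {}
--     },
--     "hal.dll (10.0.19041.600)": {
--         "functions": {
--             "KeQueryPerformanceCounter": {
--                 "type": "export",
--                 "code": "LARGE_INTEGER KeQueryPerformanceCounter(PLARGE_INTEGER PerformanceFrequency) {\n    return HalpGetPerformanceCounterV2();\n}"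
--             }
--         },
--         "structs": {}
--     },
--     # --- FLTMGR ---
--     "fltmgr.sys (10.0.19041.1)": {
--         "functions": {
--             "FltGetRoutineAddress": {
--                 "type": "export",
--                 "code": "PVOID FltGetRoutineAddress(PCSTR FltMgrRoutineName) {\n    return FltpGetRoutineAddress(FltMgrRoutineName);\n}"
--             }
--         },
--         "structs": {}
--     }
-- }
--
-- def resolve_symbol_definition(target_bin_name, target_ver, symbol_name, original_full_string=None):
--     current_full_string = f"{target_bin_name} ({target_ver})"
--     if not original_full_string:
--         original_full_string = current_full_string
--
--     # 1. Check current binary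
--     if current_full_string in SYMBOL_DATA:
--         bin_content = SYMBOL_DATA[current_full_string]
--         if symbol_name in bin_content.get('functions', {}):
--             f_data = bin_content['functions'][symbol_name]
--             if f_data['type'] != 'import':
--                 is_redir = current_full_string != original_full_string
--                 return f_data['code'], current_full_string, None, is_redir
--             else:
--                 return resolve_symbol_definition(f_data['source_binary'], target_ver, symbol_name, original_full_string)
--
--         if symbol_name in bin_content.get('structs', {}):
--             is_redir = current_full_string != original_full_string
--             return bin_content['structs'][symbol_name], current_full_string, None, is_redir
--
--     # 2. Version Fallback Logic
--     all_bins = [k for k in SYMBOL_DATA.keys() if k.startswith(target_bin_name)]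
--     if all_bins:
--         fallback_full_string = all_bins[0]
--         fallback_ver = fallback_full_string.split('(')[1].replace(')', '')
--         bin_content = SYMBOL_DATA[fallback_full_string]
--
--         if symbol_name in bin_content.get('functions', {}):
--             f_data = bin_content['functions'][symbol_name]
--             if f_data['type'] != 'import':
--                 err = f"!!RED!! Version match failed for {target_ver}. Resolved via: {fallback_ver}"
--                 return f_data['code'], fallback_full_string, err, True
--             else:
--                 return resolve_symbol_definition(f_data['source_binary'], fallback_ver, symbol_name, original_full_string)
--
--     return None, None, f"Symbol '{symbol_name}' not found.", False
-- ===== SOURCE B (Python) =====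
-- SYMBOL_DATA = {
--     "ntoskrnl.exe (10.0.19041.1)": {
--         "functions": {
--             "PsGetCurrentProcess": {
--                 "type": "export",
--                 "code": "struct _EPROCESS* PsGetCurrentProcess(void) {\n    return (struct _EPROCESS*)KeGetCurrentThread()->ApcState.Process;\n}"
--             },
--             "KeQueryPerformanceCounter": {
--                 "type": "import",
--                 "source_binary": "hal.dll",
--                 "code": "// Redirected to hal.dll"
--             },
--             "FltGetRoutineAddress": {
--                 "type": "import",
--                 "source_binary": "fltmgr.sys",
--                 "code": "// Redirected to fltmgr.sys"
--             }
--         },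
--         "structs": {
--             "_EPROCESS": "struct _EPROCESS {\n    struct _KPROCESS Pcb;\n    uint32_t UniqueProcessId;\n};"
--         }
--     },
--     "ntoskrnl.exe (10.0.19041.500)": {
--         "functions": {
--             "PsGetCurrentProcess": {
--                 "type": "export",
--                 "code": "struct _EPROCESS* PsGetCurrentProcess(void) {\n    /* .500 Security Patch */\n    if (!PspIsContextValid()) return NULL;\n    return (struct _EPROCESS*)KeGetCurrentThread()->ApcState.Process;\n}"
--             }
--         },
--         "structs": {}
--     },
--     "hal.dll (10.0.19041.1)": {
--         "functions": {
--             "KeQueryPerformanceCounter": {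
--                 "type": "export",
--                 "code": "LARGE_INTEGER KeQueryPerformanceCounter(PLARGE_INTEGER PerformanceFrequency) {\n    return HalpGetPerformanceCounter();\n}"
--             }
--         },
--         "structs": {}
--     },
--     "hal.dll (10.0.19041.600)": {
--         "functions": {
--             "KeQueryPerformanceCounter": {
--                 "type": "export",
--                 "code": "LARGE_INTEGER KeQueryPerformanceCounter(PLARGE_INTEGER PerformanceFrequency) {\n    return HalpGetPerformanceCounterV2();\n}"
--             }
--         },
--         "structs": {}
--     },
--     "fltmgr.sys (10.0.19041.1)": {
--         "functions": {
--             "FltGetRoutineAddress": {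
--                 "type": "export",
--                 "code": "PVOID FltGetRoutineAddress(PCSTR FltMgrRoutineName) {\n    return FltpGetRoutineAddress(FltMgrRoutineName);\n}"
--             }
--         },
--         "structs": {}
--     }
-- }
--
--
-- def resolve_symbol_definition(target_bin_name, target_ver, symbol_name, original_full_string=None):
--     # Iterative state machine instead of tail recursion: the state is (binary, version);
--     # import redirections update the state and re-enter the loop.
--     bin_name, ver = target_bin_name, target_ver
--     original = original_full_string or f"{bin_name} ({ver})"
--     while True:
--         full = f"{bin_name} ({ver})"
--         content = SYMBOL_DATA.get(full)
--         if content is not None: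
--             f = content.get('functions', {}).get(symbol_name)
--             if f is not None:
--                 if f['type'] == 'import':
--                     bin_name = f['source_binary']
--                     continue
--                 return f['code'], full, None, full != original
--             s = content.get('structs', {}).get(symbol_name)
--             if s is not None:
--                 return s, full, None, full != original
--         candidates = [k for k in SYMBOL_DATA if k.startswith(bin_name)]
--         if not candidates:
--             return None, None, f"Symbol '{symbol_name}' not found.", False
--         fb = candidates[0]
--         fb_ver = fb.split('(')[1].replace(')', '')
--         f = SYMBOL_DATA[fb].get('functions', {}).get(symbol_name)
--         if f is not None:
--             if f['type'] == 'import':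
--                 bin_name, ver = f['source_binary'], fb_ver
--                 continue
--             return f['code'], fb, f"!!RED!! Version match failed for {ver}. Resolved via: {fb_ver}", True
--         return None, None, f"Symbol '{symbol_name}' not found.", False
-- ===== Notes on version B (the rewrite author's own statement) =====
-- stated objective: alternative
-- what changed: A's tail recursion (re-entering the whole function on import redirections) is replaced by an explicit while-loop state machine over a (binary, version) state, computing the fixed original full string once up front.
import Mathlib
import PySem

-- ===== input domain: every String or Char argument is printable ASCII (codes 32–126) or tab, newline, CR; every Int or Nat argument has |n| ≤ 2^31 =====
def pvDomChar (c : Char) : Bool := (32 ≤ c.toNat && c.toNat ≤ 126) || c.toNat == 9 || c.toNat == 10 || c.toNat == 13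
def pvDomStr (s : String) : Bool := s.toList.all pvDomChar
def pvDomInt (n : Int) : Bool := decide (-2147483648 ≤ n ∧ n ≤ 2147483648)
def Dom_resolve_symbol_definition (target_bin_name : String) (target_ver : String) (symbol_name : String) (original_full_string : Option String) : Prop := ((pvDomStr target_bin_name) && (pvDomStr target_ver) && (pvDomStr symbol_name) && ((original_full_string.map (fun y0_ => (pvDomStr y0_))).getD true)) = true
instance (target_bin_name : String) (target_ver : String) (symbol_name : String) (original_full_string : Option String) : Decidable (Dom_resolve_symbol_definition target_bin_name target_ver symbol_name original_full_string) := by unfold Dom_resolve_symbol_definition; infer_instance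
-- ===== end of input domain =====

-- B replaces A's tail recursion by an explicit (binary, version) state machine driven by a loop; alternative decomposition, same cost.

-- Shared fixed data: SYMBOL_DATA.  A function entry is (type, source_binary, code);
-- source_binary is "" on export entries (the Python dict has no such key there and never reads it).
structure PvBin where
  functions : PySem.Dict String (String × String × String)
  structs   : PySem.Dict String String
  deriving Repr, DecidableEq

def pvSymbolData : PySem.Dict String PvBin := PySem.Dict.ofList [
  ("ntoskrnl.exe (10.0.19041.1)",
    { functions := PySem.Dict.ofList [
        ("PsGetCurrentProcess", ("export", "", "struct _EPROCESS* PsGetCurrentProcess(void) {\n    return (struct _EPROCESS*)KeGetCurrentThread()->ApcState.Process;\n}")),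
        ("KeQueryPerformanceCounter", ("import", "hal.dll", "// Redirected to hal.dll")),
        ("FltGetRoutineAddress", ("import", "fltmgr.sys", "// Redirected to fltmgr.sys"))],
      structs := PySem.Dict.ofList [
        ("_EPROCESS", "struct _EPROCESS {\n    struct _KPROCESS Pcb;\n    uint32_t UniqueProcessId;\n};")] }),
  ("ntoskrnl.exe (10.0.19041.500)",
    { functions := PySem.Dict.ofList [
        ("PsGetCurrentProcess", ("export", "", "struct _EPROCESS* PsGetCurrentProcess(void) {\n    /* .500 Security Patch */\n    if (!PspIsContextValid()) return NULL;\n    return (struct _EPROCESS*)KeGetCurrentThread()->ApcState.Process;\n}"))],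
      structs := PySem.Dict.ofList [] }),
  ("hal.dll (10.0.19041.1)",
    { functions := PySem.Dict.ofList [
        ("KeQueryPerformanceCounter", ("export", "", "LARGE_INTEGER KeQueryPerformanceCounter(PLARGE_INTEGER PerformanceFrequency) {\n    return HalpGetPerformanceCounter();\n}"))],
      structs := PySem.Dict.ofList [] }),
  ("hal.dll (10.0.19041.600)",
    { functions := PySem.Dict.ofList [
        ("KeQueryPerformanceCounter", ("export", "", "LARGE_INTEGER KeQueryPerformanceCounter(PLARGE_INTEGER PerformanceFrequency) {\n    return HalpGetPerformanceCounterV2();\n}"))],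
      structs := PySem.Dict.ofList [] }),
  ("fltmgr.sys (10.0.19041.1)",
    { functions := PySem.Dict.ofList [
        ("FltGetRoutineAddress", ("export", "", "PVOID FltGetRoutineAddress(PCSTR FltMgrRoutineName) {\n    return FltpGetRoutineAddress(FltMgrRoutineName);\n}"))],
      structs := PySem.Dict.ofList [] })]

def pvEmptyBin : PvBin := { functions := PySem.Dict.ofList [], structs := PySem.Dict.ofList [] }

-- f"{bin} ({ver})" and fallback_full_string.split('(')[1].replace(')', '')
def pvFull (bin ver : String) : String := bin ++ " (" ++ ver ++ ")"
def pvFbVer (fb : String) : String :=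
  PySem.Str.replace ((PySem.List.pyGet? ((PySem.Str.split? fb "(").getD []) 1).getD "") ")" ""

-- `if not original_full_string: original_full_string = current_full_string`
def pvOrigA (bin ver : String) (o : Option String) : String :=
  match o with
  | none => pvFull bin ver
  | some t => if t = "" then pvFull bin ver else t

-- ===== PORT A =====
-- A's tail recursion, with a fuel guard for totality only (the fixed data admits at most
-- one redirection, so fuel 8 is never exhausted; fuel-0 returns the not-found tuple).
-- Python's fall-through from section 1 to section 2 is written out twice (Lean's match has
-- no fall-through).  SYMBOL_DATA[fallback_full_string] cannot fail (fb is a key): getD pvEmptyBin.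
def pvResolveGoA : Nat → String → String → String → Option String →
    Option String × Option String × Option String × Bool
  | 0, _, _, sym, _ => (none, none, some ("Symbol '" ++ sym ++ "' not found."), false)
  | Nat.succ fuel, bin, ver, sym, orig =>
    let cur := pvFull bin ver
    let origS := pvOrigA bin ver orig
    match PySem.Dict.get? pvSymbolData cur with
    | some bc =>
      match PySem.Dict.get? bc.functions sym with
      | some f =>
        if f.1 ≠ "import" then (some f.2.2, some cur, none, cur != origS)
        else pvResolveGoA fuel f.2.1 ver sym (some origS)
      | none =>
        match PySem.Dict.get? bc.structs sym with
        | some sc => (some sc, some cur, none, cur != origS)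
        | none =>
          -- section 2: version fallback
          match (PySem.Dict.keys pvSymbolData).filter (fun k => PySem.Str.startswith k bin) with
          | [] => (none, none, some ("Symbol '" ++ sym ++ "' not found."), false)
          | fb :: _ =>
            let fbVer := pvFbVer fb
            let fbc := (PySem.Dict.get? pvSymbolData fb).getD pvEmptyBin
            match PySem.Dict.get? fbc.functions sym with
            | some f =>
              if f.1 ≠ "import" then
                (some f.2.2, some fb, some ("!!RED!! Version match failed for " ++ ver ++ ". Resolved via: " ++ fbVer), true)
              else pvResolveGoA fuel f.2.1 fbVer sym (some origS)
            | none => (none, none, some ("Symbol '" ++ sym ++ "' not found."), false)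
    | none =>
      -- section 2: version fallback (fall-through from the "current binary unknown" path)
      match (PySem.Dict.keys pvSymbolData).filter (fun k => PySem.Str.startswith k bin) with
      | [] => (none, none, some ("Symbol '" ++ sym ++ "' not found."), false)
      | fb :: _ =>
        let fbVer := pvFbVer fb
        let fbc := (PySem.Dict.get? pvSymbolData fb).getD pvEmptyBin
        match PySem.Dict.get? fbc.functions sym with
        | some f =>
          if f.1 ≠ "import" then
            (some f.2.2, some fb, some ("!!RED!! Version match failed for " ++ ver ++ ". Resolved via: " ++ fbVer), true)
          else pvResolveGoA fuel f.2.1 fbVer sym (some origS)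
        | none => (none, none, some ("Symbol '" ++ sym ++ "' not found."), false)

def resolve_symbol_definition (target_bin_name : String) (target_ver : String) (symbol_name : String) (original_full_string : Option String) : Option String × Option String × Option String × Bool :=
  pvResolveGoA 8 target_bin_name target_ver symbol_name original_full_string

-- ===== PORT B =====
-- one loop body: either a result (.inr) or the next (binary, version) state (.inl)
def pvCandB (sym ver bin : String) :
    (String × String) ⊕ (Option String × Option String × Option String × Bool) :=
  match (PySem.Dict.keys pvSymbolData).filter (fun k => PySem.Str.startswith k bin) with
  | [] => Sum.inr (none, none, some ("Symbol '" ++ sym ++ "' not found."), false)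
  | fb :: _ =>
    let fbVer := pvFbVer fb
    match PySem.Dict.get? ((PySem.Dict.get? pvSymbolData fb).getD pvEmptyBin).functions sym with
    | some f =>
      if f.1 = "import" then Sum.inl (f.2.1, fbVer)
      else Sum.inr (some f.2.2, some fb, some ("!!RED!! Version match failed for " ++ ver ++ ". Resolved via: " ++ fbVer), true)
    | none => Sum.inr (none, none, some ("Symbol '" ++ sym ++ "' not found."), false)

def pvStepB (sym orig : String) (st : String × String) :
    (String × String) ⊕ (Option String × Option String × Option String × Bool) :=
  let full := pvFull st.1 st.2
  match PySem.Dict.get? pvSymbolData full with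
  | some content =>
    match PySem.Dict.get? content.functions sym with
    | some f =>
      if f.1 = "import" then Sum.inl (f.2.1, st.2)
      else Sum.inr (some f.2.2, some full, none, full != orig)
    | none =>
      match PySem.Dict.get? content.structs sym with
      | some sc => Sum.inr (some sc, some full, none, full != orig)
      | none => pvCandB sym st.2 st.1
  | none => pvCandB sym st.2 st.1

-- the while-True loop (fuel guard for totality only; never exhausted on the fixed data)
def pvLoopB : Nat → String → String → String × String →
    Option String × Option String × Option String × Bool
  | 0, sym, _, _ => (none, none, some ("Symbol '" ++ sym ++ "' not found."), false)
  | Nat.succ fuel, sym, orig, st =>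
    match pvStepB sym orig st with
    | Sum.inr r => r
    | Sum.inl st' => pvLoopB fuel sym orig st'

def resolve_symbol_definition_alt (target_bin_name : String) (target_ver : String) (symbol_name : String) (original_full_string : Option String) : Option String × Option String × Option String × Bool :=
  let original :=
    match original_full_string with
    | none => pvFull target_bin_name target_ver
    | some t => if t = "" then pvFull target_bin_name target_ver else t
  pvLoopB 8 symbol_name original (target_bin_name, target_ver)

-- ===== PRECONDITION & SPEC =====
def Spec_resolve_symbol_definition (target_bin_name : String) (target_ver : String) (symbol_name : String) (original_full_string : Option String) (out : Option String × Option String × Option String × Bool) : Prop := out = resolve_symbol_definition_alt target_bin_name target_ver symbol_name original_full_string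
instance (target_bin_name : String) (target_ver : String) (symbol_name : String) (original_full_string : Option String) (out : Option String × Option String × Option String × Bool) : Decidable (Spec_resolve_symbol_definition target_bin_name target_ver symbol_name original_full_string out) := by unfold Spec_resolve_symbol_definition; infer_instance

-- ===== CLAIM (what is proved, stated in full; the proofs are below) =====
def Claim_equal_resolve_symbol_definition : Prop := ∀ (target_bin_name : String) (target_ver : String) (symbol_name : String) (original_full_string : Option String), Dom_resolve_symbol_definition target_bin_name target_ver symbol_name original_full_string → Spec_resolve_symbol_definition target_bin_name target_ver symbol_name original_full_string (resolve_symbol_definition target_bin_name target_ver symbol_name original_full_string)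

-- ===== LEMMAS AND PROOFS =====

lemma pvFull_ne_empty (bin ver : String) : pvFull bin ver ≠ "" := by
  intro h
  have h2 := congrArg String.toList h
  simp [pvFull] at h2

lemma pvOrigA_ne_empty (bin ver : String) (o : Option String) : pvOrigA bin ver o ≠ "" := by
  cases o with
  | none => exact pvFull_ne_empty bin ver
  | some t =>
    by_cases ht : t = "" <;> simp [pvOrigA, ht, pvFull_ne_empty]

lemma pvOrigA_some {t : String} (ht : t ≠ "") (bin ver : String) :
    pvOrigA bin ver (some t) = t := by simp [pvOrigA, ht]

lemma pvGoA_eq_loopB (fuel : Nat) : ∀ (bin ver sym : String) (o : Option String),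
    pvResolveGoA fuel bin ver sym o = pvLoopB fuel sym (pvOrigA bin ver o) (bin, ver) := by
  induction fuel with
  | zero => intro bin ver sym o; rfl
  | succ n ih =>
    intro bin ver sym o
    have hne : pvOrigA bin ver o ≠ "" := pvOrigA_ne_empty bin ver o
    simp only [pvResolveGoA, pvLoopB, pvStepB, pvCandB]
    cases hd : PySem.Dict.get? pvSymbolData (pvFull bin ver) with
    | none =>
      dsimp only
      cases hc : (PySem.Dict.keys pvSymbolData).filter (fun k => PySem.Str.startswith k bin) with
      | nil => rfl
      | cons fb rest =>
        dsimp only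
        cases hf : PySem.Dict.get? ((PySem.Dict.get? pvSymbolData fb).getD pvEmptyBin).functions sym with
        | none => rfl
        | some f =>
          dsimp only
          by_cases himp : f.1 = "import"
          · simp only [himp, ne_eq, not_true_eq_false, if_false, if_true, ih, pvOrigA_some hne]
          · simp [himp]
    | some bc =>
      dsimp only
      cases hf : PySem.Dict.get? bc.functions sym with
      | some f =>
        dsimp only
        by_cases himp : f.1 = "import"
        · simp only [himp, ne_eq, not_true_eq_false, if_false, if_true, ih, pvOrigA_some hne]
        · simp [himp]
      | none =>
        dsimp only
        cases hs : PySem.Dict.get? bc.structs sym with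
        | some sc => rfl
        | none =>
          dsimp only
          cases hc : (PySem.Dict.keys pvSymbolData).filter (fun k => PySem.Str.startswith k bin) with
          | nil => rfl
          | cons fb rest =>
            dsimp only
            cases hf2 : PySem.Dict.get? ((PySem.Dict.get? pvSymbolData fb).getD pvEmptyBin).functions sym with
            | none => rfl
            | some f =>
              dsimp only
              by_cases himp : f.1 = "import"
              · simp only [himp, ne_eq, not_true_eq_false, if_false, if_true, ih, pvOrigA_some hne]
              · simp [himp]

-- ===== VERDICT (by name: the statement is the Claim_ definition above) =====
theorem resolve_symbol_definition_spec : Claim_equal_resolve_symbol_definition := by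
  intro b v s o _
  unfold Spec_resolve_symbol_definition resolve_symbol_definition resolve_symbol_definition_alt
  rw [pvGoA_eq_loopB]
  rfl
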